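-- pv_equiv track=rewrite | github.com/vinhveer/CrackDetector | auto.py | _build_stage_list
-- ===== SOURCE A (Python) =====
-- from typing import Any
--
-- STAGE_ORDER: list[tuple[str, str]] = [
--     ("input", "input"),
--     ("preprocessed", "preprocess"),
--     ("dino_boxes_overlay", "dino_boxes"),
--     ("sam_raw_mask_viz", "sam_raw_mask"),
--     ("geometry_input_viz", "geometry_input"),
--     ("geometry_kept_mask_viz", "geometry_kept"),
--     ("final_mask", "final_mask"),
--     ("final_overlay", "final_overlay"),
-- ]
--
-- def _build_stage_list(images: dict[str, Any]) -> list[tuple[str, str]]: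
--     # Return list of (key, display_name) with deterministic order.
--     present = set((images or {}).keys())
--     stages: list[tuple[str, str]] = [(k, n) for (k, n) in STAGE_ORDER if k in present]
--
--     # Add remaining keys not in STAGE_ORDER, sorted for stability.
--     used = {k for k, _ in stages}
--     extras = sorted([k for k in present if k not in used])
--     for k in extras:
--         stages.append((k, k))
--     return stages
-- ===== SOURCE B (Python) =====
-- from typing import Any
--
-- STAGE_ORDER: list[tuple[str, str]] = [
--     ("input", "input"),
--     ("preprocessed", "preprocess"),
--     ("dino_boxes_overlay", "dino_boxes"),
--     ("sam_raw_mask_viz", "sam_raw_mask"),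
--     ("geometry_input_viz", "geometry_input"),
--     ("geometry_kept_mask_viz", "geometry_kept"),
--     ("final_mask", "final_mask"),
--     ("final_overlay", "final_overlay"),
-- ]
--
-- def _build_stage_list(images: dict[str, Any]) -> list[tuple[str, str]]:
--     # One unified sort: stage keys by their STAGE_ORDER index, extras after them
--     # (shared sentinel rank) in alphabetical order.
--     rank = {k: i for i, (k, _) in enumerate(STAGE_ORDER)}
--     names = dict(STAGE_ORDER)
--     present = set((images or {}).keys())
--     ordered = sorted(present, key=lambda k: (rank.get(k, len(STAGE_ORDER)), k))
--     return [(k, names.get(k, k)) for k in ordered]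
-- ===== Notes on version B (the rewrite author's own statement) =====
-- stated objective: idiomatic
-- what changed: B replaces A's two-bucket construction (filter STAGE_ORDER by presence, then append the sorted non-stage extras) by one precomputed rank/name table and a single sorted() of the present keys under the composite key (rank, key).
import Mathlib
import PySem

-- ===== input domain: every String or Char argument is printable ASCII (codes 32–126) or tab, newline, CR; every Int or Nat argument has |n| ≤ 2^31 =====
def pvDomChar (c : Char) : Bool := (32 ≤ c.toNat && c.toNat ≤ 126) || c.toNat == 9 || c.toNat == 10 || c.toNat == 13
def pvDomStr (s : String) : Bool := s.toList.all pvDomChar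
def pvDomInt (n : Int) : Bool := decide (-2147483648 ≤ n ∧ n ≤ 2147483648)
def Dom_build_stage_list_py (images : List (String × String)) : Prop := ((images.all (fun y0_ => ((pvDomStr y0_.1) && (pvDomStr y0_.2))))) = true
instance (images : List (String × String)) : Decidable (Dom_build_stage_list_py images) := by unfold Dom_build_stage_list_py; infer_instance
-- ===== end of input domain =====

-- B replaces A's two-bucket construction (filter STAGE_ORDER, then append sorted extras)
-- by ONE sort of the present keys under the composite key (rank, key); equal return value,
-- no speed claim. ('images or {}' has the same keys as 'images' for a dict argument, so the
-- ports take the key list directly.)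

-- ===== PORT A =====
def STAGE_ORDER_py : List (String × String) :=
  [("input", "input"), ("preprocessed", "preprocess"), ("dino_boxes_overlay", "dino_boxes"),
   ("sam_raw_mask_viz", "sam_raw_mask"), ("geometry_input_viz", "geometry_input"),
   ("geometry_kept_mask_viz", "geometry_kept"), ("final_mask", "final_mask"),
   ("final_overlay", "final_overlay")]

def build_stage_list_py (images : List (String × String)) : List (String × String) :=
  let present : PySem.Set String := PySem.Set.ofList (images.map Prod.fst)
  let stages : List (String × String) := STAGE_ORDER_py.filter (fun p => PySem.Set.contains present p.1)
  let used : PySem.Set String := PySem.Set.ofList (stages.map Prod.fst)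
  -- '[k for k in present if k not in used]' is filtered off a set, but it is sorted right
  -- after with the injective identity key, so Python's set-iteration order cannot show.
  let extras : List String := PySem.List.sorted (present.filter (fun k => !(PySem.Set.contains used k))) (fun k => k)
  stages ++ extras.map (fun k => (k, k))

-- ===== PORT B =====
-- rank = {k: i for i, (k, _) in enumerate(STAGE_ORDER)}  (module-level constant data)
def pvRank : PySem.Dict String Int :=
  (PySem.List.enumerate STAGE_ORDER_py 0).foldl (fun d p => PySem.Dict.insert d p.2.1 p.1) PySem.Dict.empty
-- names = dict(STAGE_ORDER)
def pvNames : PySem.Dict String String := PySem.Dict.ofList STAGE_ORDER_py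

def build_stage_list_py_alt (images : List (String × String)) : List (String × String) :=
  let present : PySem.Set String := PySem.Set.ofList (images.map Prod.fst)
  -- sorted(present, key=lambda k: (rank.get(k, len(STAGE_ORDER)), k)) — key injective on the set
  let ordered : List String := PySem.List.sorted2 present (fun k => PySem.Dict.getD pvRank k 8) (fun k => k)
  ordered.map (fun k => (k, PySem.Dict.getD pvNames k k))

-- ===== PRECONDITION & SPEC =====
def Spec_build_stage_list_py (images : List (String × String)) (out : List (String × String)) : Prop := out = build_stage_list_py_alt images
instance (images : List (String × String)) (out : List (String × String)) : Decidable (Spec_build_stage_list_py images out) := by unfold Spec_build_stage_list_py; infer_instance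

-- ===== CLAIM (what is proved, stated in full; the proofs are below) =====
def Claim_equal_build_stage_list_py : Prop := ∀ (images : List (String × String)), Dom_build_stage_list_py images → Spec_build_stage_list_py images (build_stage_list_py images)

-- ===== LEMMAS AND PROOFS =====

def pvSK : List String := STAGE_ORDER_py.map Prod.fst

theorem pvRank_keys : pvRank.keys = pvSK := by decide

theorem pvNames_keys : pvNames.keys = pvSK := by decide

theorem pvSK_nodup : pvSK.Nodup := by decide

theorem pvRank_mem_lt : ∀ k ∈ pvSK, PySem.Dict.getD pvRank k 8 < 8 := by decide

theorem pvRank_pairwise : pvSK.Pairwise (fun a b => PySem.Dict.getD pvRank a 8 < PySem.Dict.getD pvRank b 8) := by decide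

theorem pvRank_not_mem (k : String) (h : k ∉ pvSK) : PySem.Dict.getD pvRank k 8 = 8 := by
  apply PySem.Dict.getD_of_not_contains
  rw [PySem.Dict.contains_eq_decide_mem_keys, pvRank_keys]
  simpa using h

theorem pvNames_not_mem (k : String) (h : k ∉ pvSK) : PySem.Dict.getD pvNames k k = k := by
  apply PySem.Dict.getD_of_not_contains
  rw [PySem.Dict.contains_eq_decide_mem_keys, pvNames_keys]
  simpa using h

theorem pvNames_mem : ∀ p ∈ STAGE_ORDER_py, PySem.Dict.getD pvNames p.1 p.1 = p.2 := by decide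

theorem map_filter_fst (l : List (String × String)) (c : String → Bool) :
    (l.filter (fun p => c p.1)).map Prod.fst = (l.map Prod.fst).filter c := by
  induction l with
  | nil => rfl
  | cons x xs ih => by_cases h : c x.1 <;> simp [h, ih]

theorem sorted2_eq_sorted_lex (xs : List String) (k1 : String → Int) :
    PySem.List.sorted2 xs k1 (fun k => k) =
      PySem.List.sorted xs (fun k => toLex (k1 k, k)) := by
  simp only [PySem.List.sorted2, PySem.List.sorted, Bool.false_eq_true, if_false]
  congr 1
  funext acc x
  congr 1
  funext a b
  rcases lt_trichotomy (k1 a) (k1 b) with h | h | h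
  · simp [Prod.Lex.lt_iff, h]
  · simp [Prod.Lex.lt_iff, h]
  · simp [Prod.Lex.lt_iff, not_lt_of_gt h, h, h.ne']

theorem nodup_strict {l : List String} (hn : l.Nodup) (hp : l.Pairwise (fun a b => a ≤ b)) :
    l.Pairwise (fun a b => a < b) := by
  have := List.Pairwise.and hn hp
  exact this.imp (fun h => lt_of_le_of_ne h.2 h.1)

theorem build_eq (images : List (String × String)) :
    build_stage_list_py images = build_stage_list_py_alt images := by
  simp only [build_stage_list_py, build_stage_list_py_alt]
  set P : List String := PySem.Set.ofList (images.map Prod.fst) with hPdef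
  have hPnd : P.Nodup := PySem.Set.nodup_ofList _
  set stages : List (String × String) := STAGE_ORDER_py.filter (fun p => PySem.Set.contains P p.1) with hstages
  set SKf : List String := pvSK.filter (fun k => PySem.Set.contains P k) with hSKfdef
  have hSKf : stages.map Prod.fst = SKf := by rw [hstages, map_filter_fst]; rfl
  have hSKfnd : SKf.Nodup := pvSK_nodup.filter _
  have hused : PySem.Set.ofList (stages.map Prod.fst) = SKf := by
    rw [hSKf]; exact PySem.Set.ofList_eq_self_of_nodup _ hSKfnd
  rw [hused]
  have hfc : P.filter (fun k => !(PySem.Set.contains SKf k)) = P.filter (fun k => !(pvSK.contains k)) := by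
    apply List.filter_congr
    intro k hk
    rw [Bool.eq_iff_iff]
    simp [PySem.Set.contains, hSKfdef, List.mem_filter, hk]
  rw [hfc]
  set E : List String := PySem.List.sorted (P.filter (fun k => !(pvSK.contains k))) (fun k => k) with hEdef
  have hEperm : E.Perm (P.filter (fun k => !(pvSK.contains k))) := PySem.List.sorted_perm _ _ _
  have hEnd : E.Nodup := hEperm.nodup_iff.2 (hPnd.filter _)
  have hElt : E.Pairwise (fun a b => a < b) :=
    nodup_strict hEnd (PySem.List.sorted_pairwise _ _)
  have hEmem : ∀ k ∈ E, k ∈ P ∧ k ∉ pvSK := by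
    intro k hk
    have := hEperm.mem_iff.1 hk
    simpa [List.mem_filter, List.contains_iff_mem] using this
  have hSKfmem : ∀ k ∈ SKf, k ∈ pvSK := fun k hk => (List.mem_filter.1 hk).1
  -- the unified sort of B equals A's two buckets
  have hperm : (SKf ++ E).Perm P := by
    have h1 : SKf.Perm (P.filter (fun k => pvSK.contains k)) := by
      rw [List.perm_ext_iff_of_nodup hSKfnd (hPnd.filter _)]
      intro a
      simp [hSKfdef, List.mem_filter, PySem.Set.contains, and_comm]
    exact (h1.append hEperm).trans (List.filter_append_perm _ _)
  have hpair : (SKf ++ E).Pairwise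
      (fun a b => (toLex (PySem.Dict.getD pvRank a 8, a) : Lex (Int × String)) <
        toLex (PySem.Dict.getD pvRank b 8, b)) := by
    rw [List.pairwise_append]
    refine ⟨(pvRank_pairwise.filter _).imp (fun h => Prod.Lex.lt_iff.2 (Or.inl h)), ?_, ?_⟩
    · refine hElt.imp_of_mem (fun {a b} ha hb h => Prod.Lex.lt_iff.2 (Or.inr ⟨?_, h⟩))
      show PySem.Dict.getD pvRank a 8 = PySem.Dict.getD pvRank b 8
      rw [pvRank_not_mem a (hEmem a ha).2, pvRank_not_mem b (hEmem b hb).2]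
    · intro a ha b hb
      refine Prod.Lex.lt_iff.2 (Or.inl ?_)
      rw [pvRank_not_mem b (hEmem b hb).2]
      exact pvRank_mem_lt a (hSKfmem a ha)
  have hsorted : PySem.List.sorted2 P (fun k => PySem.Dict.getD pvRank k 8) (fun k => k) = SKf ++ E := by
    rw [sorted2_eq_sorted_lex]
    exact PySem.List.sorted_eq_of_perm_of_pairwise_lt _ _ _ hperm hpair
  rw [hsorted, List.map_append]
  congr 1
  · rw [← hSKf, List.map_map]
    conv_lhs => rw [← List.map_id stages]
    apply List.map_congr_left
    intro p hp
    have h := pvNames_mem p (List.mem_of_mem_filter hp)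
    obtain ⟨k, v⟩ := p
    simp only [id_eq, Function.comp_apply]
    rw [h]
  · apply List.map_congr_left
    intro k hk
    rw [pvNames_not_mem k (hEmem k hk).2]

-- ===== VERDICT (by name: the statement is the Claim_ definition above) =====
theorem build_stage_list_py_spec : Claim_equal_build_stage_list_py := by
  intro images _
  unfold Spec_build_stage_list_py
  exact build_eq images
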